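-- pv_equiv track=rewrite | github.com/mlis-111/om-zjj | utils/augmented_psa.py | _bfs_neighbors
-- ===== SOURCE A (Python) =====
-- from collections import deque
-- from typing import Dict, List, Set, Tuple
--
-- def _get_neighbors(idx: int,
--                    hierarchy_parents: Dict[int, List[int]],
--                    hierarchy_children: Dict[int, List[int]],
--                    part_of_parents: Dict[int, List[int]],
--                    part_of_children: Dict[int, List[int]]) -> List[int]:
--     """获取一个实体在is-a和part-of关系下的所有直接邻居（双向）"""
--     neighbors = []
--     neighbors.extend(hierarchy_parents.get(idx, []))
--     neighbors.extend(hierarchy_children.get(idx, []))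
--     neighbors.extend(part_of_parents.get(idx, []))
--     neighbors.extend(part_of_children.get(idx, []))
--     return neighbors
--
-- def _bfs_neighbors(start_idx: int,
--                    hierarchy_parents: Dict[int, List[int]],
--                    hierarchy_children: Dict[int, List[int]],
--                    part_of_parents: Dict[int, List[int]],
--                    part_of_children: Dict[int, List[int]],
--                    max_depth: int = 3) -> Set[int]:
--     """
--     BFS遍历从start_idx出发，在is-a和part-of关系下
--     双向传播max_depth跳内的所有实体索引（不含start_idx本身）。
--     """
--     visited = {start_idx}
--     queue = deque([(start_idx, 0)])
--     result = set()
--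
--     while queue:
--         curr, depth = queue.popleft()
--         if depth >= max_depth:
--             continue
--         for neighbor in _get_neighbors(
--             curr,
--             hierarchy_parents, hierarchy_children,
--             part_of_parents, part_of_children
--         ):
--             if neighbor not in visited:
--                 visited.add(neighbor)
--                 result.add(neighbor)
--                 queue.append((neighbor, depth + 1))
--
--     return result
-- ===== SOURCE B (Python) =====
-- def _get_neighbors(idx, hierarchy_parents, hierarchy_children, part_of_parents, part_of_children):
--     neighbors = []
--     neighbors.extend(hierarchy_parents.get(idx, []))
--     neighbors.extend(hierarchy_children.get(idx, []))
--     neighbors.extend(part_of_parents.get(idx, []))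
--     neighbors.extend(part_of_children.get(idx, []))
--     return neighbors
--
-- def _bfs_neighbors(start_idx,
--                    hierarchy_parents,
--                    hierarchy_children,
--                    part_of_parents,
--                    part_of_children,
--                    max_depth=3):
--     """Iterated set saturation (fixed point of the one-step neighbor closure):
--     repeatedly replace `reached` by reached ∪ N(reached); stop when stationary;
--     the answer is the final reached set minus the start node."""
--     reached = {start_idx}
--     for _ in range(max_depth):
--         expanded = set(reached)
--         for u in reached:
--             expanded.update(_get_neighbors(u, hierarchy_parents, hierarchy_children,
--                                            part_of_parents, part_of_children))
--         if len(expanded) == len(reached):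
--             break
--         reached = expanded
--     reached.discard(start_idx)
--     return reached
-- ===== Notes on version B (the rewrite author's own statement) =====
-- stated objective: alternative
-- what changed: Replaced the visited/result/queue BFS with an iterated set-saturation: each round replaces the whole reached set by its one-step neighbor closure until it is stationary or max_depth rounds pass, and the answer is the final reached set minus the start node; no visited marking, no queue, no incremental result accumulation.
import Mathlib
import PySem

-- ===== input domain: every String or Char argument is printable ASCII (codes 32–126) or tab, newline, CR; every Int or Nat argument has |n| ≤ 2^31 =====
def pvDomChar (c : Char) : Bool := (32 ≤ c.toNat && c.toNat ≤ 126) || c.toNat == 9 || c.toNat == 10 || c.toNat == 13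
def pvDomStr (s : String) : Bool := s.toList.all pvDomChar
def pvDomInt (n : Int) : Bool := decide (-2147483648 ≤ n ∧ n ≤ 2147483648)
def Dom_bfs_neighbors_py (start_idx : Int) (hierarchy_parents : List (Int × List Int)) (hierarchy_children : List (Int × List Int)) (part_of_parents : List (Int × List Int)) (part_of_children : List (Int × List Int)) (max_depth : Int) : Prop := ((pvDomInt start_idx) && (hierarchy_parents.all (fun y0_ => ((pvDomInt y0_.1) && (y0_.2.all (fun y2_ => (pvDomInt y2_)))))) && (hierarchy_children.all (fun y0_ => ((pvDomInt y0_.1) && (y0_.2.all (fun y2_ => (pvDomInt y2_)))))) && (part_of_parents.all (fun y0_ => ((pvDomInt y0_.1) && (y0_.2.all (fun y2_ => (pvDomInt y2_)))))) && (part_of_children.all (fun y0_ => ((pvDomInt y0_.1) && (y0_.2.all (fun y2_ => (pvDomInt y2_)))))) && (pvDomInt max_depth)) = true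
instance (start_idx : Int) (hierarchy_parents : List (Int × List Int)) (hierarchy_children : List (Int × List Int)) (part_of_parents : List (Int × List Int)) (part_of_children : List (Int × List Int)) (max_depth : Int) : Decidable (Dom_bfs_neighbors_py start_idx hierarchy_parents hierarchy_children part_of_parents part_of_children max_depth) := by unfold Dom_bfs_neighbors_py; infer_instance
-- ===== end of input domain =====

-- ===== PORT A =====
-- B replaces A's visited/result/queue BFS by an iterated set-saturation (fixed point of the
-- one-step neighbor closure); return value only (no observable mutation).

-- shared helper: Python dict lookup d.get(idx, []) on a dict built from the pairs (last value wins, first position kept)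
def pvLookup (d : List (Int × List Int)) (k : Int) : List Int :=
  (PySem.Dict.ofList d).getD k []

-- port of _get_neighbors (shared by both Pythons)
def pvGetNeighbors (idx : Int) (hp hc pp pc : List (Int × List Int)) : List Int :=
  (([] : List Int) ++ pvLookup hp idx ++ pvLookup hc idx ++ pvLookup pp idx ++ pvLookup pc idx)

-- A's inner for-loop body over one neighbor; state = (visited, result, queue)
def pvAVisit (d1 : Int) (st : PySem.Set Int × PySem.Set Int × List (Int × Int)) (nb : Int) :
    PySem.Set Int × PySem.Set Int × List (Int × Int) :=
  if nb ∈ st.1 then st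
  else (PySem.Set.add st.1 nb, PySem.Set.add st.2.1 nb, st.2.2 ++ [(nb, d1)])

-- union of all dict values: every node A can ever enqueue lies in it (used only for termination)
def pvAllVals (hp hc pp pc : List (Int × List Int)) : List Int :=
  (hp ++ hc ++ pp ++ pc).flatMap (·.2)

def pvPot (hp hc pp pc : List (Int × List Int)) (visited : List Int) : Nat :=
  ((pvAllVals hp hc pp pc).toFinset.filter (fun x => x ∉ visited)).card

lemma pvValues_update {d : PySem.Dict Int (List Int)} {ps : List (Int × List Int)} {w : List Int}
    (h : w ∈ (d.update ps).values) : w ∈ d.values ∨ w ∈ ps.map (·.2) := by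
  induction ps generalizing d with
  | nil => exact Or.inl h
  | cons p rest ih =>
    simp only [PySem.Dict.update, List.foldl_cons] at h
    rcases ih h with h' | h'
    · rcases PySem.Dict.mem_values_insert d p.1 p.2 w h' with h'' | h''
      · exact Or.inr (by simp [h''])
      · exact Or.inl h''
    · exact Or.inr (by simp; right; simpa using h')

lemma pvLookup_subset {d : List (Int × List Int)} {k x : Int} (h : x ∈ pvLookup d k) :
    x ∈ d.flatMap (·.2) := by
  unfold pvLookup at h
  rw [PySem.Dict.getD_eq_get?_getD] at h
  cases hg : (PySem.Dict.ofList d).get? k with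
  | none => rw [hg] at h; simp at h
  | some v =>
    rw [hg] at h
    simp only [Option.getD_some] at h
    have hm := PySem.Dict.mem_items_of_get?_eq_some _ hg
    have hv : v ∈ (PySem.Dict.ofList d).values := by
      simp only [PySem.Dict.values]
      exact List.mem_map.mpr ⟨(k, v), hm, rfl⟩
    have : v ∈ d.map (·.2) := by
      rcases pvValues_update (d := PySem.Dict.empty) hv with h' | h'
      · simp [PySem.Dict.values, PySem.Dict.empty] at h'
      · exact h'
    rcases List.mem_map.mp this with ⟨p, hp, rfl⟩
    exact List.mem_flatMap.mpr ⟨p, hp, h⟩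

lemma pvNeighbors_subset {hp hc pp pc : List (Int × List Int)} {idx x : Int}
    (h : x ∈ pvGetNeighbors idx hp hc pp pc) : x ∈ pvAllVals hp hc pp pc := by
  unfold pvGetNeighbors at h
  unfold pvAllVals
  simp only [List.nil_append, List.mem_append] at h
  simp only [List.append_assoc, List.flatMap_append, List.mem_append]
  rcases h with ((h | h) | h) | h
  · exact Or.inl (pvLookup_subset h)
  · exact Or.inr (Or.inl (pvLookup_subset h))
  · exact Or.inr (Or.inr (Or.inl (pvLookup_subset h)))
  · exact Or.inr (Or.inr (Or.inr (pvLookup_subset h)))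

lemma pvPot_add_lt {hp hc pp pc : List (Int × List Int)} {v : List Int} {nb : Int}
    (hU : nb ∈ pvAllVals hp hc pp pc) (hv : nb ∉ v) :
    pvPot hp hc pp pc (PySem.Set.add v nb) < pvPot hp hc pp pc v := by
  unfold pvPot
  apply Finset.card_lt_card
  rw [Finset.ssubset_iff_of_subset]
  · refine ⟨nb, ?_, ?_⟩
    · simp [hU, hv]
    · simp [PySem.Set.add_of_not_mem hv]
  · intro x hx
    simp only [Finset.mem_filter] at hx ⊢
    refine ⟨hx.1, fun hxv => hx.2 ?_⟩
    rw [PySem.Set.add_of_not_mem hv]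
    simp [hxv]

lemma pvAVisit_bound (hp hc pp pc : List (Int × List Int)) (d1 : Int) :
    ∀ (nbs : List Int) (v r : PySem.Set Int) (q : List (Int × Int)),
      (∀ x ∈ nbs, x ∈ pvAllVals hp hc pp pc) →
      2 * pvPot hp hc pp pc (nbs.foldl (pvAVisit d1) (v, r, q)).1
        + (nbs.foldl (pvAVisit d1) (v, r, q)).2.2.length
      ≤ 2 * pvPot hp hc pp pc v + q.length := by
  intro nbs
  induction nbs with
  | nil => intro v r q _; simp
  | cons nb nbs ih =>
    intro v r q hsub
    by_cases hmem : nb ∈ v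
    · simpa [pvAVisit, hmem] using ih v r q (fun x hx => hsub x (List.mem_cons_of_mem _ hx))
    · have h1 := ih (PySem.Set.add v nb) (PySem.Set.add r nb) (q ++ [(nb, d1)])
        (fun x hx => hsub x (List.mem_cons_of_mem _ hx))
      have h2 := pvPot_add_lt (hp := hp) (hc := hc) (pp := pp) (pc := pc)
        (hsub nb (List.mem_cons_self)) hmem
      have hstep : pvAVisit d1 (v, r, q) nb
          = (PySem.Set.add v nb, PySem.Set.add r nb, q ++ [(nb, d1)]) := by
        simp [pvAVisit, hmem]
      simp only [List.foldl_cons, hstep, List.length_append, List.length_cons,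
        List.length_nil] at h1 ⊢
      omega

-- A's while-loop; terminates because each processed node either shortens the queue or marks a fresh node visited
def pvALoop (hp hc pp pc : List (Int × List Int)) (m : Int)
    (queue : List (Int × Int)) (visited result : PySem.Set Int) : List Int :=
  match queue with
  | [] => result
  | (curr, depth) :: rest =>
    if m ≤ depth then pvALoop hp hc pp pc m rest visited result
    else
      let st := (pvGetNeighbors curr hp hc pp pc).foldl (pvAVisit (depth + 1)) (visited, result, rest)
      pvALoop hp hc pp pc m st.2.2 st.1 st.2.1
termination_by 2 * pvPot hp hc pp pc visited + queue.length
decreasing_by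
  · simp
  · have := pvAVisit_bound hp hc pp pc (depth + 1) (pvGetNeighbors curr hp hc pp pc)
      visited result rest (fun x hx => pvNeighbors_subset hx)
    simp only [List.length_cons]
    omega

def bfs_neighbors_py (start_idx : Int) (hierarchy_parents : List (Int × List Int)) (hierarchy_children : List (Int × List Int)) (part_of_parents : List (Int × List Int)) (part_of_children : List (Int × List Int)) (max_depth : Int) : List Int :=
  pvALoop hierarchy_parents hierarchy_children part_of_parents part_of_children max_depth
    [(start_idx, 0)] (PySem.Set.ofList [start_idx]) PySem.Set.empty

-- ===== PORT B =====
-- B's inner loop body over one reached node u: expanded.update(_get_neighbors(u, ...))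
def pvSatAdd (hp hc pp pc : List (Int × List Int)) (acc : PySem.Set Int) (u : Int) :
    PySem.Set Int :=
  PySem.Set.update acc (pvGetNeighbors u hp hc pp pc)

-- one round: expanded = set(reached); for u in reached: expanded.update(N(u))
def pvSatRound (hp hc pp pc : List (Int × List Int)) (reached : PySem.Set Int) : PySem.Set Int :=
  reached.foldl (pvSatAdd hp hc pp pc) reached

-- B's 'for _ in range(max_depth)' loop with the 'if len(expanded) == len(reached): break'
def pvSatRounds (hp hc pp pc : List (Int × List Int)) : Nat → PySem.Set Int → PySem.Set Int
  | 0, reached => reached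
  | n + 1, reached =>
    let e := pvSatRound hp hc pp pc reached
    if PySem.Set.len e = PySem.Set.len reached then reached
    else pvSatRounds hp hc pp pc n e

def bfs_neighbors_py_alt (start_idx : Int) (hierarchy_parents : List (Int × List Int)) (hierarchy_children : List (Int × List Int)) (part_of_parents : List (Int × List Int)) (part_of_children : List (Int × List Int)) (max_depth : Int) : List Int :=
  PySem.Set.discard
    (pvSatRounds hierarchy_parents hierarchy_children part_of_parents part_of_children
      max_depth.toNat (PySem.Set.ofList [start_idx])) start_idx

-- ===== PRECONDITION & SPEC =====
def Spec_bfs_neighbors_py (start_idx : Int) (hierarchy_parents : List (Int × List Int)) (hierarchy_children : List (Int × List Int)) (part_of_parents : List (Int × List Int)) (part_of_children : List (Int × List Int)) (max_depth : Int) (out : List Int) : Prop := out = bfs_neighbors_py_alt start_idx hierarchy_parents hierarchy_children part_of_parents part_of_children max_depth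
instance (start_idx : Int) (hierarchy_parents : List (Int × List Int)) (hierarchy_children : List (Int × List Int)) (part_of_parents : List (Int × List Int)) (part_of_children : List (Int × List Int)) (max_depth : Int) (out : List Int) : Decidable (Spec_bfs_neighbors_py start_idx hierarchy_parents hierarchy_children part_of_parents part_of_children max_depth out) := by unfold Spec_bfs_neighbors_py; infer_instance

-- ===== CLAIM (what is proved, stated in full; the proofs are below) =====
def Claim_equal_bfs_neighbors_py : Prop := ∀ (start_idx : Int) (hierarchy_parents : List (Int × List Int)) (hierarchy_children : List (Int × List Int)) (part_of_parents : List (Int × List Int)) (part_of_children : List (Int × List Int)) (max_depth : Int), Dom_bfs_neighbors_py start_idx hierarchy_parents hierarchy_children part_of_parents part_of_children max_depth → Spec_bfs_neighbors_py start_idx hierarchy_parents hierarchy_children part_of_parents part_of_children max_depth (bfs_neighbors_py start_idx hierarchy_parents hierarchy_children part_of_parents part_of_children max_depth)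

-- ===== LEMMAS AND PROOFS =====
-- Proof-only bridge: a level-synchronous reading of A's queue (one layer per round),
-- then shown equal to B's saturation rounds.

def pvBVisit (st : PySem.Set Int × PySem.Set Int × List Int) (nb : Int) :
    PySem.Set Int × PySem.Set Int × List Int :=
  if nb ∈ st.1 then st
  else (PySem.Set.add st.1 nb, PySem.Set.add st.2.1 nb, st.2.2 ++ [nb])

def pvBNode (hp hc pp pc : List (Int × List Int))
    (st : PySem.Set Int × PySem.Set Int × List Int) (u : Int) :
    PySem.Set Int × PySem.Set Int × List Int :=
  (pvGetNeighbors u hp hc pp pc).foldl pvBVisit st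

def pvBRounds (hp hc pp pc : List (Int × List Int)) :
    Nat → List Int → PySem.Set Int → PySem.Set Int → List Int
  | 0, _, _, result => result
  | n + 1, frontier, visited, result =>
    if frontier = [] then result
    else
      let st := frontier.foldl (pvBNode hp hc pp pc) (visited, result, [])
      pvBRounds hp hc pp pc n st.2.2 st.1 st.2.1

lemma pvBVisit_acc : ∀ (nbs : List Int) (v r : PySem.Set Int) (a : List Int),
    nbs.foldl pvBVisit (v, r, a)
      = ((nbs.foldl pvBVisit (v, r, [])).1, (nbs.foldl pvBVisit (v, r, [])).2.1,
         a ++ (nbs.foldl pvBVisit (v, r, [])).2.2) := by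
  intro nbs
  induction nbs with
  | nil => intro v r a; simp
  | cons nb nbs ih =>
    intro v r a
    by_cases h : nb ∈ v
    · have hstep : ∀ b : List Int, pvBVisit (v, r, b) nb = (v, r, b) := by
        intro b; simp [pvBVisit, h]
      simp only [List.foldl_cons, hstep]
      exact ih v r a
    · have hstep : ∀ b : List Int, pvBVisit (v, r, b) nb
          = (PySem.Set.add v nb, PySem.Set.add r nb, b ++ [nb]) := by
        intro b; simp [pvBVisit, h]
      simp only [List.foldl_cons, hstep, List.nil_append]
      rw [ih _ _ (a ++ [nb]), ih _ _ [nb]]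
      simp

lemma pvAfold_eq (d1 : Int) : ∀ (nbs : List Int) (v r : PySem.Set Int) (q : List (Int × Int)),
    nbs.foldl (pvAVisit d1) (v, r, q)
      = ((nbs.foldl pvBVisit (v, r, [])).1, (nbs.foldl pvBVisit (v, r, [])).2.1,
         q ++ ((nbs.foldl pvBVisit (v, r, [])).2.2).map (fun u => (u, d1))) := by
  intro nbs
  induction nbs with
  | nil => intro v r q; simp
  | cons nb nbs ih =>
    intro v r q
    by_cases h : nb ∈ v
    · have hstepA : pvAVisit d1 (v, r, q) nb = (v, r, q) := by simp [pvAVisit, h]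
      have hstepB : pvBVisit (v, r, ([] : List Int)) nb = (v, r, []) := by simp [pvBVisit, h]
      simp only [List.foldl_cons, hstepA, hstepB]
      exact ih v r q
    · have hstepA : pvAVisit d1 (v, r, q) nb
          = (PySem.Set.add v nb, PySem.Set.add r nb, q ++ [(nb, d1)]) := by
        simp [pvAVisit, h]
      have hstepB : pvBVisit (v, r, ([] : List Int)) nb
          = (PySem.Set.add v nb, PySem.Set.add r nb, [nb]) := by
        simp [pvBVisit, h]
      simp only [List.foldl_cons, hstepA, hstepB]
      rw [ih, pvBVisit_acc _ _ _ [nb]]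
      simp

lemma pvBNode_acc (hp hc pp pc : List (Int × List Int)) :
    ∀ (fr : List Int) (v r : PySem.Set Int) (a : List Int),
    fr.foldl (pvBNode hp hc pp pc) (v, r, a)
      = ((fr.foldl (pvBNode hp hc pp pc) (v, r, [])).1,
         (fr.foldl (pvBNode hp hc pp pc) (v, r, [])).2.1,
         a ++ (fr.foldl (pvBNode hp hc pp pc) (v, r, [])).2.2) := by
  intro fr
  induction fr with
  | nil => intro v r a; simp
  | cons u fr ih =>
    intro v r a
    simp only [List.foldl_cons, pvBNode]
    rw [pvBVisit_acc _ _ _ a]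
    rw [ih, ih _ _ ((pvGetNeighbors u hp hc pp pc).foldl pvBVisit (v, r, [])).2.2]
    simp

lemma pvALoop_drain (hp hc pp pc : List (Int × List Int)) (m : Int) :
    ∀ (q : List (Int × Int)) (v r : PySem.Set Int), (∀ p ∈ q, m ≤ p.2) →
    pvALoop hp hc pp pc m q v r = r := by
  intro q
  induction q with
  | nil => intro v r _; rw [pvALoop]
  | cons p rest ih =>
    intro v r h
    obtain ⟨c, depth⟩ := p
    rw [pvALoop]
    rw [if_pos (h _ List.mem_cons_self)]
    exact ih v r (fun p hp' => h p (List.mem_cons_of_mem _ hp'))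

-- one A-step on a frontier node, rewritten through the per-node fold
lemma pvALoop_cons_step (hp hc pp pc : List (Int × List Int)) (u : Int) (fr pend : List Int)
    (v r : PySem.Set Int) (d m : Int) (hd : d < m) :
    pvALoop hp hc pp pc m ((u :: fr).map (fun u => (u, d)) ++ pend.map (fun u => (u, d + 1))) v r
      = pvALoop hp hc pp pc m
          (fr.map (fun u => (u, d)) ++
            ((pend ++ (pvBNode hp hc pp pc (v, r, []) u).2.2).map (fun u => (u, d + 1))))
          (pvBNode hp hc pp pc (v, r, []) u).1 (pvBNode hp hc pp pc (v, r, []) u).2.1 := by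
  simp only [List.map_cons, List.cons_append]
  rw [pvALoop]
  rw [if_neg (by omega)]
  simp only [pvAfold_eq]
  simp [pvBNode, List.append_assoc]

-- the frontier fold, one node peeled off, with the accumulator made explicit
lemma pvBNode_fold_cons (hp hc pp pc : List (Int × List Int)) (u : Int) (fr : List Int)
    (v r : PySem.Set Int) :
    (u :: fr).foldl (pvBNode hp hc pp pc) (v, r, [])
      = ((fr.foldl (pvBNode hp hc pp pc)
            ((pvBNode hp hc pp pc (v, r, []) u).1, (pvBNode hp hc pp pc (v, r, []) u).2.1, [])).1,
         (fr.foldl (pvBNode hp hc pp pc)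
            ((pvBNode hp hc pp pc (v, r, []) u).1, (pvBNode hp hc pp pc (v, r, []) u).2.1, [])).2.1,
         (pvBNode hp hc pp pc (v, r, []) u).2.2 ++
           (fr.foldl (pvBNode hp hc pp pc)
              ((pvBNode hp hc pp pc (v, r, []) u).1, (pvBNode hp hc pp pc (v, r, []) u).2.1, [])).2.2) := by
  simp only [List.foldl_cons]
  rw [show pvBNode hp hc pp pc (v, r, []) u
      = ((pvBNode hp hc pp pc (v, r, []) u).1, (pvBNode hp hc pp pc (v, r, []) u).2.1,
         (pvBNode hp hc pp pc (v, r, []) u).2.2) from rfl]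
  rw [pvBNode_acc hp hc pp pc fr _ _ (pvBNode hp hc pp pc (v, r, []) u).2.2]

lemma pvMain (hp hc pp pc : List (Int × List Int)) :
    ∀ (n : Nat) (fr pend : List Int) (v r : PySem.Set Int) (d m : Int), m = d + n + 1 →
    pvALoop hp hc pp pc m (fr.map (fun u => (u, d)) ++ pend.map (fun u => (u, d + 1))) v r
      = pvBRounds hp hc pp pc n
          (pend ++ (fr.foldl (pvBNode hp hc pp pc) (v, r, [])).2.2)
          (fr.foldl (pvBNode hp hc pp pc) (v, r, [])).1
          (fr.foldl (pvBNode hp hc pp pc) (v, r, [])).2.1 := by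
  intro n
  induction n with
  | zero =>
    intro fr
    induction fr with
    | nil =>
      intro pend v r d m hm
      simp only [List.map_nil, List.nil_append, List.foldl_nil, pvBRounds]
      exact pvALoop_drain hp hc pp pc m _ v r (by
        intro p hp'
        rcases List.mem_map.mp hp' with ⟨u, _, rfl⟩
        simp; omega)
    | cons u fr ihf =>
      intro pend v r d m hm
      rw [pvALoop_cons_step hp hc pp pc u fr pend v r d m (by omega)]
      rw [ihf (pend ++ (pvBNode hp hc pp pc (v, r, []) u).2.2)
            (pvBNode hp hc pp pc (v, r, []) u).1 (pvBNode hp hc pp pc (v, r, []) u).2.1 d m hm]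
      rw [pvBNode_fold_cons hp hc pp pc u fr v r]
      simp
  | succ n' ihn =>
    intro fr
    induction fr with
    | nil =>
      intro pend v r d m hm
      simp only [List.map_nil, List.nil_append, List.foldl_nil, List.append_nil]
      by_cases hp0 : pend = []
      · subst hp0
        simp only [List.map_nil]
        rw [pvALoop, pvBRounds]
        simp
      · rw [pvBRounds]
        rw [if_neg hp0]
        have := ihn pend [] v r (d + 1) m (by omega)
        simpa using this
    | cons u fr ihf =>
      intro pend v r d m hm
      rw [pvALoop_cons_step hp hc pp pc u fr pend v r d m (by omega)]
      rw [ihf (pend ++ (pvBNode hp hc pp pc (v, r, []) u).2.2)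
            (pvBNode hp hc pp pc (v, r, []) u).1 (pvBNode hp hc pp pc (v, r, []) u).2.1 d m hm]
      rw [pvBNode_fold_cons hp hc pp pc u fr v r]
      simp

-- A's loop equals the level-synchronous rounds (whole-run corollary of pvMain)
lemma pvAB (hp hc pp pc : List (Int × List Int)) (s m : Int) :
    pvALoop hp hc pp pc m [(s, 0)] (PySem.Set.ofList [s]) PySem.Set.empty
      = pvBRounds hp hc pp pc m.toNat [s] (PySem.Set.ofList [s]) PySem.Set.empty := by
  by_cases hm : m ≤ 0
  · rw [pvALoop_drain hp hc pp pc m _ _ _ (by intro p hp'; simp at hp'; simp [hp']; omega)]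
    rw [Int.toNat_of_nonpos hm, pvBRounds]
  · have hn : m = 0 + ((m - 1).toNat : Int) + 1 := by omega
    have := pvMain hp hc pp pc (m - 1).toNat [s] [] (PySem.Set.ofList [s]) PySem.Set.empty 0 m hn
    simp only [List.map_cons, List.map_nil, List.nil_append, List.append_nil,
      List.foldl_cons, List.foldl_nil] at this
    rw [this]
    have hm1 : m.toNat = (m - 1).toNat + 1 := by omega
    rw [hm1, pvBRounds]
    rw [if_neg (by simp)]
    simp

-- ---- saturation-side lemmas ----

lemma pvUpdate_noop {v : PySem.Set Int} {nbs : List Int} (h : ∀ x ∈ nbs, x ∈ v) :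
    PySem.Set.update v nbs = v := by
  rw [PySem.Set.update_eq_append_filter]
  have hf : (PySem.Set.ofList nbs).filter (fun y => !(PySem.Set.contains v y)) = [] := by
    apply List.filter_eq_nil_iff.mpr
    intro a ha
    simpa using h a ((PySem.Set.mem_ofList nbs a).mp ha)
  rw [hf, List.append_nil]

lemma pvSatFold_noop (hp hc pp pc : List (Int × List Int)) :
    ∀ (l : List Int) (v : PySem.Set Int),
      (∀ u ∈ l, ∀ x ∈ pvGetNeighbors u hp hc pp pc, x ∈ v) →
      l.foldl (pvSatAdd hp hc pp pc) v = v := by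
  intro l
  induction l with
  | nil => intro v _; rfl
  | cons u l ih =>
    intro v h
    have h1 : pvSatAdd hp hc pp pc v u = v :=
      pvUpdate_noop (h u List.mem_cons_self)
    simp only [List.foldl_cons, h1]
    exact ih v (fun u' hu' => h u' (List.mem_cons_of_mem _ hu'))

lemma pvSatFold_mono (hp hc pp pc : List (Int × List Int)) :
    ∀ (l : List Int) (v : PySem.Set Int) (x : Int), x ∈ v →
      x ∈ l.foldl (pvSatAdd hp hc pp pc) v := by
  intro l
  induction l with
  | nil => intro v x hx; exact hx
  | cons u l ih =>
    intro v x hx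
    exact ih _ x ((PySem.Set.mem_update _ _ _).mpr (Or.inl hx))

lemma pvSatFold_nbrs (hp hc pp pc : List (Int × List Int)) :
    ∀ (l : List Int) (v : PySem.Set Int), ∀ u ∈ l, ∀ x ∈ pvGetNeighbors u hp hc pp pc,
      x ∈ l.foldl (pvSatAdd hp hc pp pc) v := by
  intro l
  induction l with
  | nil => intro v u hu; cases hu
  | cons u' l ih =>
    intro v u hu x hx
    rcases List.mem_cons.mp hu with rfl | hu'
    · exact pvSatFold_mono hp hc pp pc l _ x ((PySem.Set.mem_update _ _ _).mpr (Or.inr hx))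
    · exact ih _ u hu' x hx

lemma pvVisitFold_fst : ∀ (nbs : List Int) (v r : PySem.Set Int) (a : List Int),
    (nbs.foldl pvBVisit (v, r, a)).1 = PySem.Set.update v nbs := by
  intro nbs
  induction nbs with
  | nil => intro v r a; rfl
  | cons nb nbs ih =>
    intro v r a
    rw [PySem.Set.update_cons]
    by_cases h : nb ∈ v
    · have hs : pvBVisit (v, r, a) nb = (v, r, a) := by simp [pvBVisit, h]
      rw [List.foldl_cons, hs, ih, PySem.Set.add_of_mem h]
    · have hs : pvBVisit (v, r, a) nb = (PySem.Set.add v nb, PySem.Set.add r nb, a ++ [nb]) := by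
        simp [pvBVisit, h]
      rw [List.foldl_cons, hs, ih]

lemma pvNodeFold_fst (hp hc pp pc : List (Int × List Int)) :
    ∀ (fr : List Int) (v r : PySem.Set Int) (a : List Int),
    (fr.foldl (pvBNode hp hc pp pc) (v, r, a)).1 = fr.foldl (pvSatAdd hp hc pp pc) v := by
  intro fr
  induction fr with
  | nil => intro v r a; rfl
  | cons u fr ih =>
    intro v r a
    simp only [List.foldl_cons]
    rw [show pvBNode hp hc pp pc (v, r, a) u
        = ((pvBNode hp hc pp pc (v, r, a) u).1, (pvBNode hp hc pp pc (v, r, a) u).2.1,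
           (pvBNode hp hc pp pc (v, r, a) u).2.2) from rfl]
    rw [ih]
    have h2 : (pvBNode hp hc pp pc (v, r, a) u).1 = pvSatAdd hp hc pp pc v u := by
      simpa [pvBNode, pvSatAdd] using pvVisitFold_fst (pvGetNeighbors u hp hc pp pc) v r a
    rw [h2]

lemma pvVisitFold_parts : ∀ (nbs : List Int) (v r : PySem.Set Int), (∀ x ∈ r, x ∈ v) →
    ((nbs.foldl pvBVisit (v, r, [])).1 = v ++ (nbs.foldl pvBVisit (v, r, [])).2.2)
    ∧ ((nbs.foldl pvBVisit (v, r, [])).2.1 = r ++ (nbs.foldl pvBVisit (v, r, [])).2.2)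
    ∧ (∀ x ∈ (nbs.foldl pvBVisit (v, r, [])).2.2, x ∉ v) := by
  intro nbs
  induction nbs with
  | nil => intro v r _; exact ⟨by simp, by simp, by simp⟩
  | cons nb nbs ih =>
    intro v r hrv
    by_cases h : nb ∈ v
    · have hs : pvBVisit (v, r, []) nb = (v, r, []) := by simp [pvBVisit, h]
      simp only [List.foldl_cons, hs]
      exact ih v r hrv
    · have hs : pvBVisit (v, r, []) nb
          = (PySem.Set.add v nb, PySem.Set.add r nb, [nb]) := by simp [pvBVisit, h]
      have hnr : nb ∉ r := fun hr => h (hrv nb hr)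
      have hv' : PySem.Set.add v nb = v ++ [nb] := PySem.Set.add_of_not_mem h
      have hr' : PySem.Set.add r nb = r ++ [nb] := PySem.Set.add_of_not_mem hnr
      have hrv' : ∀ x ∈ r ++ [nb], x ∈ v ++ [nb] := by
        intro x hx
        rcases List.mem_append.mp hx with hx | hx
        · exact List.mem_append.mpr (Or.inl (hrv x hx))
        · exact List.mem_append.mpr (Or.inr hx)
      obtain ⟨i1, i2, i3⟩ := ih (v ++ [nb]) (r ++ [nb]) hrv'
      simp only [List.foldl_cons, hs, hv', hr']
      rw [pvBVisit_acc _ _ _ [nb]]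
      refine ⟨?_, ?_, ?_⟩
      · simp only []
        rw [i1]; simp
      · simp only []
        rw [i2]; simp
      · intro x hx
        rcases List.mem_append.mp hx with hx | hx
        · simp at hx; subst hx; exact h
        · intro hxv
          exact i3 x hx (List.mem_append.mpr (Or.inl hxv))

lemma pvNodeFold_parts (hp hc pp pc : List (Int × List Int)) :
    ∀ (fr : List Int) (v r : PySem.Set Int), (∀ x ∈ r, x ∈ v) →
    ((fr.foldl (pvBNode hp hc pp pc) (v, r, [])).1
        = v ++ (fr.foldl (pvBNode hp hc pp pc) (v, r, [])).2.2)
    ∧ ((fr.foldl (pvBNode hp hc pp pc) (v, r, [])).2.1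
        = r ++ (fr.foldl (pvBNode hp hc pp pc) (v, r, [])).2.2)
    ∧ (∀ x ∈ (fr.foldl (pvBNode hp hc pp pc) (v, r, [])).2.2, x ∉ v) := by
  intro fr
  induction fr with
  | nil => intro v r _; exact ⟨by simp, by simp, by simp⟩
  | cons u fr ih =>
    intro v r hrv
    obtain ⟨j1, j2, j3⟩ := pvVisitFold_parts (pvGetNeighbors u hp hc pp pc) v r hrv
    have hst : pvBNode hp hc pp pc (v, r, []) u
        = ((pvBNode hp hc pp pc (v, r, []) u).1, (pvBNode hp hc pp pc (v, r, []) u).2.1,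
           (pvBNode hp hc pp pc (v, r, []) u).2.2) := rfl
    have hrv' : ∀ x ∈ (pvBNode hp hc pp pc (v, r, []) u).2.1,
        x ∈ (pvBNode hp hc pp pc (v, r, []) u).1 := by
      intro x hx
      rw [show (pvBNode hp hc pp pc (v, r, []) u).2.1
          = r ++ (pvBNode hp hc pp pc (v, r, []) u).2.2 from j2] at hx
      rw [show (pvBNode hp hc pp pc (v, r, []) u).1
          = v ++ (pvBNode hp hc pp pc (v, r, []) u).2.2 from j1]
      rcases List.mem_append.mp hx with hx | hx
      · exact List.mem_append.mpr (Or.inl (hrv x hx))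
      · exact List.mem_append.mpr (Or.inr hx)
    obtain ⟨i1, i2, i3⟩ := ih (pvBNode hp hc pp pc (v, r, []) u).1
      (pvBNode hp hc pp pc (v, r, []) u).2.1 hrv'
    rw [pvBNode_fold_cons hp hc pp pc u fr v r]
    refine ⟨?_, ?_, ?_⟩
    · simp only []
      rw [i1, show (pvBNode hp hc pp pc (v, r, []) u).1
          = v ++ (pvBNode hp hc pp pc (v, r, []) u).2.2 from j1]
      simp
    · simp only []
      rw [i2, show (pvBNode hp hc pp pc (v, r, []) u).2.1
          = r ++ (pvBNode hp hc pp pc (v, r, []) u).2.2 from j2]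
      simp
    · simp only []
      intro x hx
      rcases List.mem_append.mp hx with hx | hx
      · exact j3 x hx
      · intro hxv
        apply i3 x hx
        rw [show (pvBNode hp hc pp pc (v, r, []) u).1
            = v ++ (pvBNode hp hc pp pc (v, r, []) u).2.2 from j1]
        exact List.mem_append.mpr (Or.inl hxv)

lemma pvNodeFold_nbrs (hp hc pp pc : List (Int × List Int))
    (fr : List Int) (v r : PySem.Set Int) :
    ∀ u ∈ fr, ∀ x ∈ pvGetNeighbors u hp hc pp pc,
      x ∈ (fr.foldl (pvBNode hp hc pp pc) (v, r, [])).1 := by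
  intro u hu x hx
  rw [pvNodeFold_fst hp hc pp pc fr v r []]
  exact pvSatFold_nbrs hp hc pp pc fr v u hu x hx

lemma pvSatRound_eq (hp hc pp pc : List (Int × List Int))
    (rest fr : List Int) (res : PySem.Set Int)
    (hres : ∀ x ∈ res, x ∈ rest ++ fr)
    (hrest : ∀ u ∈ rest, ∀ x ∈ pvGetNeighbors u hp hc pp pc, x ∈ rest ++ fr) :
    pvSatRound hp hc pp pc (rest ++ fr)
      = (rest ++ fr) ++ (fr.foldl (pvBNode hp hc pp pc) (rest ++ fr, res, [])).2.2 := by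
  unfold pvSatRound
  rw [List.foldl_append]
  rw [pvSatFold_noop hp hc pp pc rest (rest ++ fr) hrest]
  rw [← pvNodeFold_fst hp hc pp pc fr (rest ++ fr) res []]
  exact (pvNodeFold_parts hp hc pp pc fr (rest ++ fr) res hres).1

lemma pvBRounds_nil (hp hc pp pc : List (Int × List Int)) :
    ∀ (n : Nat) (v r : PySem.Set Int), pvBRounds hp hc pp pc n [] v r = r := by
  intro n v r
  cases n with
  | zero => rfl
  | succ n => rw [pvBRounds]; simp

lemma pvBridge (hp hc pp pc : List (Int × List Int)) (s : Int) :
    ∀ (n : Nat) (rest fr : List Int) (res : PySem.Set Int),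
      rest ++ fr = s :: res →
      (∀ x ∈ res, x ∈ rest ++ fr) →
      (∀ u ∈ rest, ∀ x ∈ pvGetNeighbors u hp hc pp pc, x ∈ rest ++ fr) →
      s ∉ res →
      pvSatRounds hp hc pp pc n (rest ++ fr)
          = s :: pvBRounds hp hc pp pc n fr (rest ++ fr) res
      ∧ s ∉ pvBRounds hp hc pp pc n fr (rest ++ fr) res := by
  intro n
  induction n with
  | zero =>
    intro rest fr res hV hres hrest hs
    exact ⟨by rw [pvSatRounds, pvBRounds, hV], hs⟩
  | succ n ih =>
    intro rest fr res hV hres hrest hs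
    have hsV : s ∈ rest ++ fr := by rw [hV]; exact List.mem_cons_self
    obtain ⟨p1, p2, p3⟩ := pvNodeFold_parts hp hc pp pc fr (rest ++ fr) res hres
    have hround := pvSatRound_eq hp hc pp pc rest fr res hres hrest
    by_cases ht : (fr.foldl (pvBNode hp hc pp pc) (rest ++ fr, res, [])).2.2 = []
    · -- stationary: both sides return res
      have hlen : PySem.Set.len (pvSatRound hp hc pp pc (rest ++ fr))
          = PySem.Set.len (rest ++ fr) := by
        rw [hround, ht]; simp
      have hL : pvSatRounds hp hc pp pc (n + 1) (rest ++ fr) = rest ++ fr := by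
        rw [pvSatRounds, if_pos hlen]
      have hR : pvBRounds hp hc pp pc (n + 1) fr (rest ++ fr) res = res := by
        by_cases hf : fr = []
        · rw [pvBRounds]; simp [hf]
        · rw [pvBRounds]
          simp only [if_neg hf]
          rw [ht, pvBRounds_nil, p2, ht, List.append_nil]
      exact ⟨by rw [hL, hR, hV], by rw [hR]; exact hs⟩
    · -- a new layer exists: recurse
      have hf : fr ≠ [] := by
        intro hf; apply ht; rw [hf]; rfl
      have hlen : ¬ (PySem.Set.len (pvSatRound hp hc pp pc (rest ++ fr))
          = PySem.Set.len (rest ++ fr)) := by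
        rw [hround]
        simp only [PySem.Set.len, List.length_append]
        intro hc'
        apply ht
        have : (fr.foldl (pvBNode hp hc pp pc) (rest ++ fr, res, [])).2.2.length = 0 := by omega
        exact List.length_eq_zero_iff.mp this
      have hL : pvSatRounds hp hc pp pc (n + 1) (rest ++ fr)
          = pvSatRounds hp hc pp pc n (pvSatRound hp hc pp pc (rest ++ fr)) := by
        rw [pvSatRounds]; simp only [if_neg hlen]
      have hR : pvBRounds hp hc pp pc (n + 1) fr (rest ++ fr) res
          = pvBRounds hp hc pp pc n
              (fr.foldl (pvBNode hp hc pp pc) (rest ++ fr, res, [])).2.2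
              (fr.foldl (pvBNode hp hc pp pc) (rest ++ fr, res, [])).1
              (fr.foldl (pvBNode hp hc pp pc) (rest ++ fr, res, [])).2.1 := by
        rw [pvBRounds]; simp only [if_neg hf]
      -- instantiate the IH with rest' = rest ++ fr, fr' = new layer, res' = new result
      have hV' : (rest ++ fr) ++ (fr.foldl (pvBNode hp hc pp pc) (rest ++ fr, res, [])).2.2
          = s :: (fr.foldl (pvBNode hp hc pp pc) (rest ++ fr, res, [])).2.1 := by
        rw [p2, hV]; rfl
      have hres' : ∀ x ∈ (fr.foldl (pvBNode hp hc pp pc) (rest ++ fr, res, [])).2.1,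
          x ∈ (rest ++ fr) ++ (fr.foldl (pvBNode hp hc pp pc) (rest ++ fr, res, [])).2.2 := by
        intro x hx
        rw [p2] at hx
        rcases List.mem_append.mp hx with hx | hx
        · exact List.mem_append.mpr (Or.inl (hres x hx))
        · exact List.mem_append.mpr (Or.inr hx)
      have hrest' : ∀ u ∈ rest ++ fr, ∀ x ∈ pvGetNeighbors u hp hc pp pc,
          x ∈ (rest ++ fr) ++ (fr.foldl (pvBNode hp hc pp pc) (rest ++ fr, res, [])).2.2 := by
        intro u hu x hx
        rcases List.mem_append.mp hu with hu | hu
        · exact List.mem_append.mpr (Or.inl (hrest u hu x hx))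
        · have := pvNodeFold_nbrs hp hc pp pc fr (rest ++ fr) res u hu x hx
          rw [p1] at this
          exact this
      have hs' : s ∉ (fr.foldl (pvBNode hp hc pp pc) (rest ++ fr, res, [])).2.1 := by
        rw [p2]
        intro hx
        rcases List.mem_append.mp hx with hx | hx
        · exact hs hx
        · exact p3 s hx hsV
      obtain ⟨ih1, ih2⟩ := ih (rest ++ fr)
        (fr.foldl (pvBNode hp hc pp pc) (rest ++ fr, res, [])).2.2
        (fr.foldl (pvBNode hp hc pp pc) (rest ++ fr, res, [])).2.1
        hV' hres' hrest' hs'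
      constructor
      · rw [hL, hR, hround, p1]
        exact ih1
      · rw [hR, p1]
        exact ih2

-- ===== VERDICT (by name: the statement is the Claim_ definition above) =====
theorem bfs_neighbors_py_spec : Claim_equal_bfs_neighbors_py := by
  intro s hp hc pp pc m _
  unfold Spec_bfs_neighbors_py bfs_neighbors_py bfs_neighbors_py_alt
  have hof : PySem.Set.ofList [s] = ([s] : List Int) :=
    PySem.Set.ofList_eq_self_of_nodup [s] (by simp)
  obtain ⟨hb1, hb2⟩ := pvBridge hp hc pp pc s m.toNat [] [s] [] rfl
    (by intro x hx; cases hx) (by intro u hu; cases hu) (by intro hx; cases hx)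
  simp only [List.nil_append] at hb1 hb2
  rw [hof, hb1]
  have hdis : PySem.Set.discard
      (s :: pvBRounds hp hc pp pc m.toNat [s] [s] []) s
      = pvBRounds hp hc pp pc m.toNat [s] [s] [] := by
    simp only [PySem.Set.discard, List.filter_cons, beq_self_eq_true, Bool.not_true,
      Bool.false_eq_true, if_false]
    exact List.filter_eq_self.mpr (fun a ha => by
      have hne : a ≠ s := fun h => hb2 (h ▸ ha)
      simp [hne])
  rw [hdis]
  have := pvAB hp hc pp pc s m
  rw [hof] at this
  exact this
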